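-- pv_equiv track=rewrite | github.com/daniel-ben/algorithms | graphs/graphs.py | find_lowest_value_in_hashtable
-- ===== SOURCE A (Python) =====
-- def find_lowest_value_in_hashtable(hash, done_items):
--     lowest_value = float('inf')
--     lowest_item = None
--
--     for item in hash.keys():
--         if hash[item] < lowest_value and item not in done_items:
--             lowest_item = item
--             lowest_value = hash[item]
--
--     done_items.append(lowest_item)
--     return lowest_item
-- ===== SOURCE B (Python) =====
-- def find_lowest_value_in_hashtable(hash, done_items):
--     done = set(done_items)
--     candidates = sorted((k for k in hash.keys() if k not in done),
--                         key=lambda k: hash[k])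
--     lowest_item = candidates[0] if candidates else None
--     done_items.append(lowest_item)
--     return lowest_item
-- ===== Notes on version B (the rewrite author's own statement) =====
-- stated objective: idiomatic
-- what changed: Replaces the manual strict-min accumulator scan by filtering the non-done keys (set membership) and stably sorting them by value, returning the first of the sorted list (stability reproduces A's first-wins tie-breaking); the done_items.append side effect is preserved.
import Mathlib
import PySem

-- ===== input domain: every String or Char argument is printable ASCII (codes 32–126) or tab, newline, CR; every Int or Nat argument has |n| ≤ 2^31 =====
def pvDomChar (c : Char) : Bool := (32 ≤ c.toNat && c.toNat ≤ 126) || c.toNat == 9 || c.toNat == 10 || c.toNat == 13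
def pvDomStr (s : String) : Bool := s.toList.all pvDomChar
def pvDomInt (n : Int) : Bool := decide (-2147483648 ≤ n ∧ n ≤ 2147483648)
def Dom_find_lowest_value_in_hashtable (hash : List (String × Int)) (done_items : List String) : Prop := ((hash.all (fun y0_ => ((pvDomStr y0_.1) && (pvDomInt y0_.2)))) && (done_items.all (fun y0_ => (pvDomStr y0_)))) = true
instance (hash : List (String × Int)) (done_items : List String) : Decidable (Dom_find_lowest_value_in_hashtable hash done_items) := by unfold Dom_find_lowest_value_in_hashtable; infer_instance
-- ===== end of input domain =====

-- B filters the non-done keys and takes the head of a stable sort by value instead of A's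
-- strict-min accumulator scan; the equivalence is about the RETURN value only (both Pythons
-- additionally append the returned item to done_items).
-- ===== PORT A =====
def find_lowest_value_in_hashtable (hash : List (String × Int)) (done_items : List String) : Option String :=
  let d := PySem.Dict.ofList hash
  let st := (PySem.Dict.keys d).foldl
    (fun (st : Option String × Option Int) item =>
      if ((match st.2 with
           | none => true
           | some lowest_value => decide (PySem.Dict.getD d item 0 < lowest_value))
          && !(done_items.contains item)) = true
      then (some item, some (PySem.Dict.getD d item 0))
      else st)
    (none, none)
  st.1

-- ===== PORT B =====
def find_lowest_value_in_hashtable_alt (hash : List (String × Int)) (done_items : List String) : Option String :=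
  let d := PySem.Dict.ofList hash
  let done := PySem.Set.ofList done_items
  let candidates := (PySem.Dict.keys d).filter (fun k => !(done.contains k))
  (PySem.List.sorted candidates (fun k => PySem.Dict.getD d k 0) false).head?

-- ===== PRECONDITION & SPEC =====
def Spec_find_lowest_value_in_hashtable (hash : List (String × Int)) (done_items : List String) (out : Option String) : Prop := out = find_lowest_value_in_hashtable_alt hash done_items
instance (hash : List (String × Int)) (done_items : List String) (out : Option String) : Decidable (Spec_find_lowest_value_in_hashtable hash done_items out) := by unfold Spec_find_lowest_value_in_hashtable; infer_instance

-- ===== CLAIM (what is proved, stated in full; the proofs are below) =====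
def Claim_equal_find_lowest_value_in_hashtable : Prop := ∀ (hash : List (String × Int)) (done_items : List String), Dom_find_lowest_value_in_hashtable hash done_items → Spec_find_lowest_value_in_hashtable hash done_items (find_lowest_value_in_hashtable hash done_items)

-- ===== LEMMAS AND PROOFS =====

-- head of insertBy: the new element wins iff it is strictly "before" the current head
theorem pv_head_insertBy {α : Type} (before : α → α → Bool) (x : α) (ys : List α) :
    (PySem.List.insertBy before x ys).head? =
      some (match ys with | [] => x | y :: _ => if before x y then x else y) := by
  cases ys with
  | nil => simp [PySem.List.insertBy]
  | cons y t =>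
      by_cases h : before x y = true <;> simp [PySem.List.insertBy, h]

-- head of the insertion-sort fold is the strict-min scan
theorem pv_fold_insertBy_head {α : Type} (before : α → α → Bool) (cs : List α) (acc : List α) :
    (cs.foldl (fun a x => PySem.List.insertBy before x a) acc).head? =
      cs.foldl
        (fun (m : Option α) x =>
          match m with
          | none => some x
          | some y => if before x y then some x else some y)
        acc.head? := by
  induction cs generalizing acc with
  | nil => rfl
  | cons x t ih =>
      simp only [List.foldl_cons]
      rw [ih]
      congr 1
      cases acc with
      | nil => simp [pv_head_insertBy]
      | cons y r =>
          simp only [pv_head_insertBy, List.head?_cons]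
          by_cases h : before x y = true <;> simp [h]

-- A's fold over all keys equals the done-free fold over the filtered keys
theorem pv_fold_filter (d : PySem.Dict String Int) (done_items : List String)
    (ks : List String) (st : Option String × Option Int) :
    ks.foldl
      (fun (st : Option String × Option Int) item =>
        if ((match st.2 with
             | none => true
             | some lowest_value => decide (PySem.Dict.getD d item 0 < lowest_value))
            && !(done_items.contains item)) = true
        then (some item, some (PySem.Dict.getD d item 0))
        else st)
      st =
    (ks.filter (fun k => !(done_items.contains k))).foldl
      (fun (st : Option String × Option Int) item =>
        if (match st.2 with
            | none => true
            | some lowest_value => decide (PySem.Dict.getD d item 0 < lowest_value)) = true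
        then (some item, some (PySem.Dict.getD d item 0))
        else st)
      st := by
  induction ks generalizing st with
  | nil => rfl
  | cons k t ih =>
      by_cases h : done_items.contains k = true
      · rw [List.foldl_cons, List.filter_cons]
        rw [h]
        simp only [Bool.not_true, Bool.and_false, Bool.false_eq_true, if_false]
        exact ih st
      · have h' : done_items.contains k = false := by
          revert h; cases done_items.contains k <;> simp
        rw [List.foldl_cons, List.filter_cons]
        rw [h']
        simp only [Bool.not_false, Bool.and_true, if_true, List.foldl_cons]
        exact ih _

-- the pair state (item, value) always carries value = item's value; its first component is the scan
theorem pv_fold_pair_fst (d : PySem.Dict String Int) (cs : List String) (m : Option String) :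
    (cs.foldl
      (fun (st : Option String × Option Int) item =>
        if (match st.2 with
            | none => true
            | some lowest_value => decide (PySem.Dict.getD d item 0 < lowest_value)) = true
        then (some item, some (PySem.Dict.getD d item 0))
        else st)
      (m, m.map (fun k => PySem.Dict.getD d k 0))).1 =
    cs.foldl
      (fun (m : Option String) x =>
        match m with
        | none => some x
        | some y => if decide (PySem.Dict.getD d x 0 < PySem.Dict.getD d y 0) then some x else some y)
      m := by
  induction cs generalizing m with
  | nil => rfl
  | cons x t ih =>
      cases m with
      | none =>
          rw [List.foldl_cons, List.foldl_cons]
          exact ih (some x)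
      | some y =>
          rw [List.foldl_cons, List.foldl_cons]
          dsimp only [Option.map_some]
          by_cases h : decide (PySem.Dict.getD d x 0 < PySem.Dict.getD d y 0) = true
          · rw [if_pos h, if_pos h]
            exact ih (some x)
          · rw [if_neg h, if_neg h]
            exact ih (some y)

-- ===== VERDICT (by name: the statement is the Claim_ definition above) =====
theorem find_lowest_value_in_hashtable_spec : Claim_equal_find_lowest_value_in_hashtable := by
  intro hash done_items _
  unfold Spec_find_lowest_value_in_hashtable
  unfold find_lowest_value_in_hashtable find_lowest_value_in_hashtable_alt
  simp only []
  rw [pv_fold_filter]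
  have hfil : (PySem.Dict.keys (PySem.Dict.ofList hash)).filter
        (fun k => !(done_items.contains k)) =
      (PySem.Dict.keys (PySem.Dict.ofList hash)).filter
        (fun k => !((PySem.Set.ofList done_items).contains k)) := by
    apply List.filter_congr
    intro k _
    have : (PySem.Set.ofList done_items).contains k = done_items.contains k := by
      simp [PySem.Set.mem_ofList]
    rw [this]
  rw [← hfil]
  rw [show ((none : Option String), (none : Option Int)) =
      ((none : Option String), (none : Option String).map (fun k => PySem.Dict.getD (PySem.Dict.ofList hash) k 0)) from rfl]
  rw [pv_fold_pair_fst]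
  rw [PySem.List.sorted_eq_foldl_insertBy]
  rw [pv_fold_insertBy_head]
  simp
  congr 1
  funext m x
  cases m with
  | none => rfl
  | some y => by_cases h : (PySem.Dict.ofList hash).getD x 0 < (PySem.Dict.ofList hash).getD y 0 <;> simp [h]
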